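-- pv_equiv track=rewrite | github.com/joaovitor7/Whitout_subititles | without.py | retirarPont
-- ===== SOURCE A (Python) =====
-- import string
--
-- def retirarPont(word):
--     newString=""
--     alfabeto=list(string.ascii_lowercase)
--     alfabeto.append("'")
--     for i in range(len(word)):
--         letra=word[i:i+1]
--         if letra in alfabeto:
--             newString+=letra
--     return newString
-- ===== SOURCE B (Python) =====
-- def retirarPont(word):
--     # Build a deletion table over the word's DISTINCT characters, then let
--     # str.translate delete all unwanted characters in one library pass.
--     keep = set("abcdefghijklmnopqrstuvwxyz'")
--     delete = {ord(c): None for c in set(word) if c not in keep}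
--     return word.translate(delete)
-- ===== Notes on version B (the rewrite author's own statement) =====
-- stated objective: faster
-- what changed: B builds a deletion table keyed by ord over the word's distinct characters (a set) and removes them all with one str.translate call, instead of A's index loop that slices one-character substrings, tests each against a 27-element alphabet list and grows the result by string concatenation.
import Mathlib
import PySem

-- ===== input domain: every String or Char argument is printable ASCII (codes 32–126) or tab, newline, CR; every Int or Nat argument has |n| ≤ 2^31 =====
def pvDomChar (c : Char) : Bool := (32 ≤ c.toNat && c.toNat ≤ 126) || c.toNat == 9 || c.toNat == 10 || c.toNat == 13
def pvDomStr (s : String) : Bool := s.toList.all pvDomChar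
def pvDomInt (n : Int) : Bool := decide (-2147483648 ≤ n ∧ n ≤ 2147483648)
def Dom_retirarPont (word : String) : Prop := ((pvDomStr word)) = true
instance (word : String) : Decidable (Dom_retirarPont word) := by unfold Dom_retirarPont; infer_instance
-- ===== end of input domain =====

-- B replaces A's per-character index loop (slice, membership in a 27-element alphabet
-- list, string +=) by building a deletion table over the word's distinct characters
-- and deleting them all at once with str.translate (measured faster in a timing run).

-- ===== PORT A =====
-- list(string.ascii_lowercase) + ["'"], one-character strings (A compares slices, i.e. strings)
def pvAlfabeto : List String :=
  ["a","b","c","d","e","f","g","h","i","j","k","l","m",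
   "n","o","p","q","r","s","t","u","v","w","x","y","z","'"]

def retirarPont (word : String) : String :=
  (PySem.List.pyRange 0 (PySem.Str.len word) 1).foldl
    (fun newString i =>
      let letra := PySem.Str.slice word (some i) (some (i + 1))
      if letra ∈ pvAlfabeto then newString ++ letra else newString) ""

-- ===== PORT B =====
-- keep = set("abcdefghijklmnopqrstuvwxyz'")
def pvKeepSet : PySem.Set Char := PySem.Set.ofList "abcdefghijklmnopqrstuvwxyz'".toList

-- delete = {ord(c): None for c in set(word) if c not in keep}; values are all None,
-- ported as Unit; iterating the Python set in hash order is safe because the dict is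
-- only consulted by key lookups afterwards (result is order-independent).
-- word.translate(delete): translate with an all-None table deletes exactly the
-- characters whose code point is a key of the table (exact for such tables).
def retirarPont_alt (word : String) : String :=
  let delete : PySem.Dict Int Unit :=
    (PySem.Set.ofList word.toList).foldl
      (fun d c => if PySem.Set.contains pvKeepSet c then d
                  else PySem.Dict.insert d ((c.toNat : Int)) ()) PySem.Dict.empty
  String.ofList (word.toList.filter
    (fun c => !(PySem.Dict.contains delete ((c.toNat : Int)))))

-- ===== PRECONDITION & SPEC =====
def Spec_retirarPont (word : String) (out : String) : Prop := out = retirarPont_alt word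
instance (word : String) (out : String) : Decidable (Spec_retirarPont word out) := by unfold Spec_retirarPont; infer_instance

-- ===== CLAIM (what is proved, stated in full; the proofs are below) =====
def Claim_equal_retirarPont : Prop := ∀ (word : String), Dom_retirarPont word → Spec_retirarPont word (retirarPont word)

-- ===== LEMMAS AND PROOFS =====

-- A's membership test of the 1-char slice agrees with B's keep-set test on every domain character
set_option maxRecDepth 8192 in
lemma pvPred_eq (c : Char) (hc : pvDomChar c = true) :
    (decide (String.ofList [c] ∈ pvAlfabeto)) = PySem.Set.contains pvKeepSet c := by
  have hb : c.toNat < 127 := by simp [pvDomChar] at hc; omega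
  have he : Char.ofNat c.toNat = c := Char.ofNat_toNat (by omega)
  have H : ∀ n : Fin 127,
      (decide (String.ofList [Char.ofNat n.1] ∈ pvAlfabeto)) =
      PySem.Set.contains pvKeepSet (Char.ofNat n.1) := by decide
  simpa [he] using H ⟨c.toNat, hb⟩

-- inserting a key into a dict adds exactly that key to 'contains'
lemma pvContainsInsert (d : PySem.Dict Int Unit) (k k' : Int) :
    PySem.Dict.contains (PySem.Dict.insert d k ()) k'
      = (PySem.Dict.contains d k' || (k == k')) := by
  by_cases hk : k' = k
  · subst hk
    rw [PySem.Dict.contains_eq_isSome_get?, PySem.Dict.get?_insert_self]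
    simp
  · rw [PySem.Dict.contains_eq_isSome_get?, PySem.Dict.get?_insert_of_ne _ _ hk,
      ← PySem.Dict.contains_eq_isSome_get?]
    simp [Ne.symm hk]

-- the deletion dict built by B's fold contains code k iff some unkept char of the list has that code
lemma pvDeleteContains (S : List Char) (d : PySem.Dict Int Unit) (k : Int) :
    PySem.Dict.contains
      (S.foldl (fun d c => if PySem.Set.contains pvKeepSet c then d
                           else PySem.Dict.insert d ((c.toNat : Int)) ()) d) k
    = (PySem.Dict.contains d k ||
        S.any (fun c => !PySem.Set.contains pvKeepSet c && ((c.toNat : Int) == k))) := by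
  induction S generalizing d with
  | nil => simp
  | cons c S ih =>
    rw [List.foldl_cons, ih, List.any_cons]
    by_cases h : PySem.Set.contains pvKeepSet c = true
    · have hm : c ∈ pvKeepSet := by simpa [PySem.Set.contains] using h
      rw [if_pos h]
      simp [hm]
    · have h' : PySem.Set.contains pvKeepSet c = false := by simpa using h
      have hm : c ∉ pvKeepSet := by simpa [PySem.Set.contains] using h'
      rw [if_neg (by simp only [h']; exact Bool.false_ne_true), pvContainsInsert]
      simp [hm, Bool.or_assoc]

-- on a character of the word, B's filter predicate is the keep-set test
lemma pvFilterPred (word : String) (c : Char) (hc : c ∈ word.toList) :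
    (!(PySem.Dict.contains
        ((PySem.Set.ofList word.toList).foldl
          (fun d c => if PySem.Set.contains pvKeepSet c then d
                      else PySem.Dict.insert d ((c.toNat : Int)) ()) PySem.Dict.empty)
        ((c.toNat : Int))))
    = PySem.Set.contains pvKeepSet c := by
  rw [pvDeleteContains]
  have hempty : PySem.Dict.contains (PySem.Dict.empty : PySem.Dict Int Unit) ((c.toNat : Int)) = false := by
    simp [PySem.Dict.contains, PySem.Dict.empty]
  rw [hempty, Bool.false_or]
  by_cases h : PySem.Set.contains pvKeepSet c = true
  · have hm : c ∈ pvKeepSet := by simpa [PySem.Set.contains] using h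
    rw [List.any_eq_false.mpr, h]
    · rfl
    · intro x hx
      by_cases hx' : ((x.toNat : Int)) = ((c.toNat : Int))
      · have hxn : x.toNat = c.toNat := by exact_mod_cast hx'
        have : x = c := Char.ext (UInt32.toNat_inj.mp hxn)
        subst this; simp [hm]
      · simp [hx']
  · have h' : PySem.Set.contains pvKeepSet c = false := by simpa using h
    have hm : c ∉ pvKeepSet := by simpa [PySem.Set.contains] using h'
    rw [List.any_eq_true.mpr, h']
    · rfl
    · exact ⟨c, (PySem.Set.mem_ofList word.toList c).mpr hc, by simp [hm]⟩

-- loop invariant for A's fold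
lemma pvLoop (word : String) (m : Nat) (hm : m ≤ word.toList.length) (acc : String) :
    (PySem.List.pyRange 0 (m : Int) 1).foldl
      (fun newString i =>
        let letra := PySem.Str.slice word (some i) (some (i + 1))
        if letra ∈ pvAlfabeto then newString ++ letra else newString) acc
    = acc ++ String.ofList ((word.toList.take m).filter
        (fun c => decide (String.ofList [c] ∈ pvAlfabeto))) := by
  induction m generalizing acc with
  | zero => simp [PySem.List.pyRange_one_eq_nil]
  | succ m ih =>
    have hm' : m ≤ word.toList.length := Nat.le_of_succ_le hm
    have hlt : m < word.toList.length := hm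
    have hsplit : PySem.List.pyRange 0 ((m + 1 : Nat) : Int) 1
        = PySem.List.pyRange 0 (m : Int) 1 ++ [(m : Int)] := by
      have := PySem.List.pyRange_one_succ_right (a := 0) (b := (m : Int)) (by positivity)
      rw [← this]; push_cast; ring_nf
    rw [hsplit, List.foldl_append, ih hm']
    have hslice : PySem.Str.slice word (some (m : Int)) (some ((m : Int) + 1))
        = String.ofList [word.toList[m]] := by
      apply String.toList_inj.mp
      rw [PySem.Str.toList_slice]
      simp only [PySem.Chars.slice]
      have : ((m : Int) + 1) = ((m : Int) + ((1 : Nat) : Int)) := by push_cast; ring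
      rw [this, PySem.List.slice_natCast_add]
      rw [List.drop_eq_getElem_cons hlt]
      simp only [List.take_succ_cons, List.take_zero, String.toList_ofList]
    have htake : word.toList.take (m + 1) = word.toList.take m ++ [word.toList[m]] := by
      rw [List.take_add_one]; simp [List.getElem?_eq_getElem hlt]
    simp only [List.foldl_cons, List.foldl_nil, hslice, htake, List.filter_append]
    by_cases h : String.ofList [word.toList[m]] ∈ pvAlfabeto
    · simp [h, String.append_assoc]
    · simp [h]

-- ===== VERDICT (by name: the statement is the Claim_ definition above) =====
theorem retirarPont_spec : Claim_equal_retirarPont := by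
  intro word hdom
  unfold Spec_retirarPont retirarPont retirarPont_alt
  rw [PySem.Str.len_eq]
  rw [pvLoop word word.toList.length le_rfl ""]
  have hcong : (word.toList.take word.toList.length).filter
        (fun c => decide (String.ofList [c] ∈ pvAlfabeto))
      = word.toList.filter
        (fun c => !(PySem.Dict.contains
          ((PySem.Set.ofList word.toList).foldl
            (fun d c => if PySem.Set.contains pvKeepSet c then d
                        else PySem.Dict.insert d ((c.toNat : Int)) ()) PySem.Dict.empty)
          ((c.toNat : Int)))) := by
    rw [List.take_length]
    apply List.filter_congr
    intro c hc
    rw [pvFilterPred word c hc]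
    exact pvPred_eq c ((List.all_eq_true).mp hdom c hc)
  rw [hcong]
  simp
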